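-- pv_equiv track=rewrite | github.com/recovery12/courses | ieeextreme13/gcds.py | findMaxGCD
-- ===== SOURCE A (Python) =====
-- import math
--
-- def findMaxGCD(arr, n, k):
--
--     # Computing highest element
--     high = max(arr)
--     # Array to store the count of
--     # divisors i.e. Potential GCDs
--     divisors = [0] * (high + 1)
--     # Iterating over every element
--     for i in range(n) :
--     	# Calculating all the divisors
--     	for j in range(1, int(math.sqrt(arr[i])) + 1):
--     		# Divisor found
--     		if (arr[i] % j == 0):
--     			# Incrementing count for divisor
--     			divisors[j] += 1
--     			# Element/divisor is also a divisor
--     			# Checking if both divisors are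
--     			# not same
--     			if (j != arr[i] // j):
--     				divisors[arr[i] // j] += 1
--     return divisors
-- ===== SOURCE B (Python) =====
-- def findMaxGCD(arr, n, k):
--     # Frequency-then-sieve: count occurrences of each value among the first n
--     # elements, then for each candidate d sum the counts of its multiples.
--     high = max(arr)
--     freq = [0] * (high + 1)
--     for i in range(n):
--         freq[arr[i]] += 1
--     divisors = [0] * (high + 1)
--     for d in range(1, high + 1):
--         divisors[d] = sum(freq[m] for m in range(d, high + 1, d))
--     return divisors
-- ===== Notes on version B (the rewrite author's own statement) =====
-- stated objective: alternative
-- what changed: A enumerates, for every element, all divisors up to its square root (incrementing both members of each divisor pair); B instead builds a frequency table of the first n values once and then, for each candidate divisor d, sums the frequencies of the multiples d, 2d, 3d, ... (a sieve over multiples).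
import Mathlib
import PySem

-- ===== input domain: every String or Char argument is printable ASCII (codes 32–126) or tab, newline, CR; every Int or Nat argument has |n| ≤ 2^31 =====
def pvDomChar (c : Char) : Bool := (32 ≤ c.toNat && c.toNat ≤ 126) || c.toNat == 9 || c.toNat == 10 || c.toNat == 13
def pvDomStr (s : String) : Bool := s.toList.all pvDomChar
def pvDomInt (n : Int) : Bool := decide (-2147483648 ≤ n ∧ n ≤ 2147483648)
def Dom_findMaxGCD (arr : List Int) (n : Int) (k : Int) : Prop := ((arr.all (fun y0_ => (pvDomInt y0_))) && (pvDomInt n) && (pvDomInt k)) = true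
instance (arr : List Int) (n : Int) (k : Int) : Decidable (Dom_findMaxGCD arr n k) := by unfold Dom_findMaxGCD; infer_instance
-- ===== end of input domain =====

-- B replaces A's per-element sqrt divisor enumeration by a value-frequency table plus a
-- sieve over multiples of each candidate divisor (alternative algorithm, same results).

-- 'l[i] += 1' on a Python list (exact for the in-range, nonnegative indices Pre_ admits)
def pvBump (l : List Int) (i : Int) : List Int :=
  PySem.List.pySetD l i (PySem.List.pyGetD l i 0 + 1)

-- ===== PORT A =====
-- int(math.sqrt(v)) is ported as Nat.sqrt: exact for the 0 ≤ v ≤ 2^31 values Pre_/Dom admit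
-- (math.sqrt is correctly rounded, so no float error is possible at that magnitude).
def findMaxGCD (arr : List Int) (n : Int) (k : Int) : List Int :=
  let high := (PySem.List.max? arr (fun y => y)).getD 0
  (PySem.List.pyRange 0 n 1).foldl
    (fun divisors i =>
      let x := PySem.List.pyGetD arr i 0
      (PySem.List.pyRange 1 ((Nat.sqrt x.toNat : Int) + 1) 1).foldl
        (fun divisors j =>
          if PySem.Int.mod x j = 0 then
            let divisors := pvBump divisors j
            if j ≠ PySem.Int.floordiv x j then pvBump divisors (PySem.Int.floordiv x j)
            else divisors
          else divisors)
        divisors)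
    (List.replicate (high + 1).toNat 0)

-- ===== PORT B =====
def findMaxGCD_alt (arr : List Int) (n : Int) (k : Int) : List Int :=
  let high := (PySem.List.max? arr (fun y => y)).getD 0
  let freq := (PySem.List.pyRange 0 n 1).foldl
    (fun freq i => pvBump freq (PySem.List.pyGetD arr i 0))
    (List.replicate (high + 1).toNat 0)
  (PySem.List.pyRange 1 (high + 1) 1).foldl
    (fun divisors d =>
      PySem.List.pySetD divisors d
        ((PySem.List.pyRange d (high + 1) d).foldl
          (fun s m => s + PySem.List.pyGetD freq m 0) 0))
    (List.replicate (high + 1).toNat 0)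

-- ===== PRECONDITION & SPEC =====
-- Pre_ excludes exactly the inputs where Python A raises: empty arr (max), n beyond
-- len(arr) (IndexError), and a negative element among the first n (math.sqrt ValueError).
def Pre_findMaxGCD (arr : List Int) (n : Int) (k : Int) : Prop :=
  arr ≠ [] ∧ n ≤ (arr.length : Int) ∧ ∀ x ∈ arr.take n.toNat, 0 ≤ x
instance (arr : List Int) (n : Int) (k : Int) : Decidable (Pre_findMaxGCD arr n k) := by
  unfold Pre_findMaxGCD; infer_instance

def pvWitness_findMaxGCD : List Int × Int × Int := ([5, 3], 2, 0)

def Spec_findMaxGCD (arr : List Int) (n : Int) (k : Int) (out : List Int) : Prop := out = findMaxGCD_alt arr n k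
instance (arr : List Int) (n : Int) (k : Int) (out : List Int) : Decidable (Spec_findMaxGCD arr n k out) := by unfold Spec_findMaxGCD; infer_instance

-- ===== CLAIM (what is proved, stated in full; the proofs are below) =====
def Claim_equal_findMaxGCD : Prop := ∀ (arr : List Int) (n : Int) (k : Int), Dom_findMaxGCD arr n k → Pre_findMaxGCD arr n k → Spec_findMaxGCD arr n k (findMaxGCD arr n k)

-- ===== LEMMAS AND PROOFS =====

-- the common characterisation: out[p] counts the first-n elements that p divides (p ≥ 1, element ≥ 1)
def pvCnt (arr : List Int) (n : Int) (p : Nat) : Int :=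
  ((PySem.List.pyRange 0 n 1).map (fun i =>
    if 1 ≤ (p : Int) ∧ (p : Int) ∣ PySem.List.pyGetD arr i 0 ∧ 1 ≤ PySem.List.pyGetD arr i 0
    then (1 : Int) else 0)).sum

theorem pvGetD_nonneg (l : List Int) (i : Int) (hi : 0 ≤ i) (d : Int) :
    PySem.List.pyGetD l i d = l.getD i.toNat d := by
  simp only [PySem.List.pyGetD, PySem.List.pyGet?, PySem.List.pyIdx?, if_pos hi, List.getD_eq_getElem?_getD]
  by_cases h : i < (l.length : Int)
  · simp [h]
  · rw [if_neg h]
    have : l.length ≤ i.toNat := by omega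
    simp [List.getElem?_eq_none this]

theorem pvBump_length (l : List Int) (i : Int) : (pvBump l i).length = l.length := by
  simp [pvBump, PySem.List.length_pySetD]

theorem pvBump_getD (l : List Int) (i : Int) (hi : 0 ≤ i) (p : Nat) :
    (pvBump l i).getD p 0 = l.getD p 0 + (if (p : Int) = i ∧ i < (l.length : Int) then 1 else 0) := by
  unfold pvBump
  rw [PySem.List.pySetD_of_nonneg l _ hi, pvGetD_nonneg l i hi]
  rw [List.getD_eq_getElem?_getD, List.getD_eq_getElem?_getD, List.getElem?_set]
  by_cases h1 : i.toNat = p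
  · by_cases h2 : i.toNat < l.length
    · rw [if_pos h1, if_pos h2, if_pos (by omega)]
      subst h1
      simp [List.getD_eq_getElem?_getD]
    · rw [if_pos h1, if_neg h2, if_neg (by omega)]
      have : l.length ≤ p := by omega
      simp [List.getElem?_eq_none this]
  · rw [if_neg h1, if_neg (by omega)]
    simp [List.getD_eq_getElem?_getD]

theorem pvFoldl_length {α : Type} (f : List Int → α → List Int) (js : List α)
    (h : ∀ dv j, j ∈ js → (f dv j).length = dv.length) :
    ∀ dv : List Int, (js.foldl f dv).length = dv.length := by
  induction js with
  | nil => intro dv; rfl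
  | cons j t ih =>
    intro dv
    rw [List.foldl_cons, ih (fun dv j hj => h dv j (List.mem_cons_of_mem _ hj)),
      h dv j List.mem_cons_self]

theorem pvFoldl_getD_add {α : Type} (f : List Int → α → List Int) (c : α → Int) (js : List α)
    (p L : Nat)
    (hlen : ∀ dv j, j ∈ js → (f dv j).length = dv.length)
    (hpt : ∀ dv j, j ∈ js → dv.length = L → (f dv j).getD p 0 = dv.getD p 0 + c j) :
    ∀ dv : List Int, dv.length = L →
      (js.foldl f dv).getD p 0 = dv.getD p 0 + (js.map c).sum := by
  induction js with
  | nil => intro dv _; simp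
  | cons j t ih =>
    intro dv hdv
    rw [List.foldl_cons, List.map_cons, List.sum_cons,
      ih (fun dv j hj => hlen dv j (List.mem_cons_of_mem _ hj))
         (fun dv j hj => hpt dv j (List.mem_cons_of_mem _ hj))
         _ (by rw [hlen dv j List.mem_cons_self, hdv]),
      hpt dv j List.mem_cons_self hdv]
    ring

theorem pvSum_indicator (l : List Int) (hl : l.Nodup) (P : Int → Prop) [DecidablePred P] (c : Int)
    (hc : ∀ j ∈ l, P j → j = c) :
    (l.map (fun j => if P j then (1 : Int) else 0)).sum = if c ∈ l ∧ P c then 1 else 0 := by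
  induction l with
  | nil => simp
  | cons a t ih =>
    rw [List.map_cons, List.sum_cons,
      ih (List.Nodup.of_cons hl) (fun j hj hp => hc j (List.mem_cons_of_mem _ hj) hp)]
    by_cases hpa : P a
    · have hac : a = c := hc a List.mem_cons_self hpa
      subst hac
      have hna : a ∉ t := (List.nodup_cons.mp hl).1
      rw [if_pos hpa, if_neg (by tauto), if_pos ⟨List.mem_cons_self, hpa⟩]
      ring
    · rw [if_neg hpa]
      by_cases hmem : c ∈ t
      · simp [hmem]
      · have : ¬(c ∈ a :: t ∧ P c) := by
          rintro ⟨hm, hp⟩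
          rcases List.mem_cons.mp hm with h | h
          · exact hpa (h ▸ hp)
          · exact hmem h
        simp only [if_neg this, if_neg (fun hh : c ∈ t ∧ P c => this ⟨List.mem_cons_of_mem _ hh.1, hh.2⟩)]
        ring

theorem pvSum_map_add (l : List Int) (f g : Int → Int) :
    (l.map (fun j => f j + g j)).sum = (l.map f).sum + (l.map g).sum :=
  PySem.List.sum_map_add_int l f g

-- the sqrt pairing: a divisor pp of X is met exactly once by the loop over j ≤ √X
theorem pvSqrtPair (X pp : Nat) (hx : 1 ≤ X) (hp : 1 ≤ pp) (hd : pp ∣ X) :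
    ((if pp ≤ Nat.sqrt X then (1 : Int) else 0)
      + (if X / pp ≤ Nat.sqrt X ∧ X / pp ≠ pp then (1 : Int) else 0)) = 1 := by
  set s := Nat.sqrt X with hs
  obtain ⟨q, hq⟩ := hd
  have hppos : 0 < pp := hp
  have hqpos : 0 < q := by
    rcases Nat.eq_zero_or_pos q with h | h
    · subst h; simp at hq; omega
    · exact h
  have hdiv : X / pp = q := by rw [hq, Nat.mul_div_cancel_left _ hppos]
  have hss : s * s ≤ X := by
    have := Nat.sqrt_le' X
    nlinarith [this]
  have hlt : X < (s + 1) * (s + 1) := by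
    have := Nat.lt_succ_sqrt' X
    nlinarith [this]
  rw [hdiv]
  by_cases h1 : pp ≤ s
  · rw [if_pos h1]
    have h2 : ¬(q ≤ s ∧ q ≠ pp) := by
      rintro ⟨hqs, hqne⟩
      rcases Nat.lt_or_ge q pp with h | h
      · nlinarith
      · have : pp < q := by omega
        nlinarith
    rw [if_neg h2]; ring
  · rw [if_neg h1]
    have hqle : q ≤ s := by nlinarith
    have hqne : q ≠ pp := by omega
    rw [if_pos ⟨hqle, hqne⟩]
    ring

-- the same statement over Int, phrased on the port's primitives
theorem pvSqrtPairInt (x pp : Int) (hx : 1 ≤ x) (hp : 1 ≤ pp) (hd : pp ∣ x) :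
    ((if pp ≤ (Nat.sqrt x.toNat : Int) then (1 : Int) else 0)
      + (if PySem.Int.floordiv x pp ≤ (Nat.sqrt x.toNat : Int) ∧ PySem.Int.floordiv x pp ≠ pp
         then (1 : Int) else 0)) = 1 := by
  have hxX : x = (x.toNat : Int) := (Int.toNat_of_nonneg (by omega)).symm
  have hpP : pp = (pp.toNat : Int) := (Int.toNat_of_nonneg (by omega)).symm
  have hdn : pp.toNat ∣ x.toNat := by
    rw [hxX, hpP] at hd; exact_mod_cast hd
  have hfd : PySem.Int.floordiv x pp = ((x.toNat / pp.toNat : Nat) : Int) := by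
    rw [hxX, hpP]; exact PySem.Int.floordiv_natCast x.toNat pp.toNat
  rw [hfd]
  have hmain := pvSqrtPair x.toNat pp.toNat (by omega) (by omega) hdn
  have e1 : (pp ≤ (Nat.sqrt x.toNat : Int)) ↔ (pp.toNat ≤ Nat.sqrt x.toNat) := by
    rw [hpP]; exact_mod_cast Iff.rfl
  have e2 : (((x.toNat / pp.toNat : Nat) : Int) ≤ (Nat.sqrt x.toNat : Int))
      ↔ (x.toNat / pp.toNat ≤ Nat.sqrt x.toNat) := by exact_mod_cast Iff.rfl
  have e3 : (((x.toNat / pp.toNat : Nat) : Int) ≠ pp) ↔ (x.toNat / pp.toNat ≠ pp.toNat) := by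
    rw [hpP]; exact_mod_cast Iff.rfl
  rw [if_congr e1 rfl rfl, if_congr (and_congr e2 e3) rfl rfl]
  exact hmain

theorem pvOneLeDiv (x a : Int) (ha : 1 ≤ a) (hax : a ≤ x) : 1 ≤ x / a :=
  (Int.le_ediv_iff_mul_le (by omega)).mpr (by nlinarith)

theorem pvDivDiv (x a : Int) (hq : 1 ≤ x / a) (hd : a ∣ x) : x / (x / a) = a := by
  have h2 : (x / a) * a = x := Int.ediv_mul_cancel hd
  nth_rewrite 1 [← h2]
  exact Int.mul_ediv_cancel_left _ (by omega)

theorem pvInnerA (x : Int) (hx : 0 ≤ x) (L : Nat) (hxL : x < (L : Int)) (p : Nat) :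
    ∀ dv : List Int, dv.length = L →
    ((PySem.List.pyRange 1 ((Nat.sqrt x.toNat : Int) + 1) 1).foldl
        (fun divisors j =>
          if PySem.Int.mod x j = 0 then
            let divisors := pvBump divisors j
            if j ≠ PySem.Int.floordiv x j then pvBump divisors (PySem.Int.floordiv x j)
            else divisors
          else divisors) dv).getD p 0
      = dv.getD p 0 + (if 1 ≤ (p : Int) ∧ (p : Int) ∣ x ∧ 1 ≤ x then 1 else 0) := by
  intro dv hdv
  have hlen : ∀ (dv' : List Int) (j : Int),
      j ∈ PySem.List.pyRange 1 ((Nat.sqrt x.toNat : Int) + 1) 1 →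
      ((fun divisors j =>
          if PySem.Int.mod x j = 0 then
            let divisors := pvBump divisors j
            if j ≠ PySem.Int.floordiv x j then pvBump divisors (PySem.Int.floordiv x j)
            else divisors
          else divisors) dv' j).length = dv'.length := by
    intro dv' j _
    dsimp only
    split_ifs <;> simp [pvBump_length]
  have hpt : ∀ (dv' : List Int) (j : Int),
      j ∈ PySem.List.pyRange 1 ((Nat.sqrt x.toNat : Int) + 1) 1 → dv'.length = L →
      ((fun divisors j =>
          if PySem.Int.mod x j = 0 then
            let divisors := pvBump divisors j
            if j ≠ PySem.Int.floordiv x j then pvBump divisors (PySem.Int.floordiv x j)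
            else divisors
          else divisors) dv' j).getD p 0
        = dv'.getD p 0
          + ((if PySem.Int.mod x j = 0 ∧ (p : Int) = j ∧ j < (L : Int) then (1 : Int) else 0)
            + (if PySem.Int.mod x j = 0 ∧ j ≠ PySem.Int.floordiv x j
                  ∧ (p : Int) = PySem.Int.floordiv x j ∧ PySem.Int.floordiv x j < (L : Int)
               then (1 : Int) else 0)) := by
    intro dv' j hj hL
    have hj1 : 1 ≤ j := (PySem.List.mem_pyRange_one.mp hj).1
    dsimp only
    by_cases hm : PySem.Int.mod x j = 0
    · rw [if_pos hm]
      have hfd : PySem.Int.floordiv x j = x / j := PySem.Int.floordiv_eq_ediv_of_pos (by omega)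
      have hfd0 : 0 ≤ PySem.Int.floordiv x j := by
        rw [hfd]; exact Int.ediv_nonneg hx (by omega)
      by_cases hne : j ≠ PySem.Int.floordiv x j
      · rw [if_pos hne]
        rw [pvBump_getD _ _ hfd0, pvBump_getD _ _ (by omega), pvBump_length, hL]
        simp only [hm, hne, true_and]
        split_ifs <;> omega
      · rw [if_neg hne]
        rw [pvBump_getD _ _ (by omega), hL]
        simp only [hm, hne, true_and, false_and, if_false]
        split_ifs <;> omega
    · rw [if_neg hm]
      simp [hm]
  rw [pvFoldl_getD_add _ _ _ p L hlen hpt dv hdv]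
  congr 1
  rw [pvSum_map_add]
  rw [pvSum_indicator (PySem.List.pyRange 1 ((Nat.sqrt x.toNat : Int) + 1) 1) (PySem.List.nodup_pyRange_one _ _)
        (fun j => PySem.Int.mod x j = 0 ∧ (p : Int) = j ∧ j < (L : Int)) (p : Int)
        (fun j _ hP => hP.2.1.symm)]
  rw [pvSum_indicator (PySem.List.pyRange 1 ((Nat.sqrt x.toNat : Int) + 1) 1) (PySem.List.nodup_pyRange_one _ _)
        (fun j => PySem.Int.mod x j = 0 ∧ j ≠ PySem.Int.floordiv x j
            ∧ (p : Int) = PySem.Int.floordiv x j ∧ PySem.Int.floordiv x j < (L : Int))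
        (PySem.Int.floordiv x (p : Int)) ?hc2]
  case hc2 =>
    intro j hj hP
    have hj1 : 1 ≤ j := (PySem.List.mem_pyRange_one.mp hj).1
    have hjs : j < (Nat.sqrt x.toNat : Int) + 1 := (PySem.List.mem_pyRange_one.mp hj).2
    have hdvd : j ∣ x := (PySem.Int.mod_eq_zero_iff_dvd x j).mp hP.1
    have hfd : PySem.Int.floordiv x j = x / j := PySem.Int.floordiv_eq_ediv_of_pos (by omega)
    -- j ≤ √x gives j*j ≤ x, hence x/j ≥ j ≥ 1
    have hjj : j * j ≤ x := by
      have h1 : (Nat.sqrt x.toNat : Int) * (Nat.sqrt x.toNat : Int) ≤ (x.toNat : Int) := by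
        exact_mod_cast Nat.sqrt_le x.toNat
      have h2 : ((x.toNat : Int)) = x := Int.toNat_of_nonneg hx
      nlinarith
    have hq1 : 1 ≤ x / j := pvOneLeDiv x j (by omega) (by nlinarith)
    have : PySem.Int.floordiv x (p : Int) = j := by
      rw [hP.2.2.1, hfd, PySem.Int.floordiv_eq_ediv_of_pos (by omega)]
      exact pvDivDiv x j hq1 hdvd
    exact this.symm
  -- now reduce the two membership indicators
  by_cases hH : 1 ≤ (p : Int) ∧ (p : Int) ∣ x ∧ 1 ≤ x
  · obtain ⟨hp1, hpd, hx1⟩ := hH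
    have hpx : (p : Int) ≤ x := Int.le_of_dvd (by omega) hpd
    have hfd : PySem.Int.floordiv x (p : Int) = x / (p : Int) :=
      PySem.Int.floordiv_eq_ediv_of_pos (by omega)
    have hq1' : 1 ≤ x / (p : Int) := pvOneLeDiv x _ (by omega) (by omega)
    have hq1 : 1 ≤ PySem.Int.floordiv x (p : Int) := by rw [hfd]; exact hq1'
    have hqd : PySem.Int.floordiv x (p : Int) ∣ x := by
      rw [hfd]; exact ⟨(p : Int), (Int.ediv_mul_cancel hpd).symm⟩
    have hback : PySem.Int.floordiv x (PySem.Int.floordiv x (p : Int)) = (p : Int) := by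
      rw [hfd, PySem.Int.floordiv_eq_ediv_of_pos (by omega)]
      exact pvDivDiv x _ hq1' hpd
    have e1 : ((p : Int) ∈ PySem.List.pyRange 1 ((Nat.sqrt x.toNat : Int) + 1) 1
          ∧ (PySem.Int.mod x (p : Int) = 0 ∧ (p : Int) = (p : Int) ∧ (p : Int) < (L : Int)))
        ↔ ((p : Int) ≤ (Nat.sqrt x.toNat : Int)) := by
      rw [PySem.List.mem_pyRange_one]
      constructor
      · rintro ⟨⟨_, h⟩, _⟩; omega
      · intro h
        exact ⟨⟨by omega, by omega⟩,
          (PySem.Int.mod_eq_zero_iff_dvd x (p : Int)).mpr hpd, rfl, by omega⟩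
    have e2 : (PySem.Int.floordiv x (p : Int) ∈ PySem.List.pyRange 1 ((Nat.sqrt x.toNat : Int) + 1) 1
          ∧ (PySem.Int.mod x (PySem.Int.floordiv x (p : Int)) = 0
            ∧ PySem.Int.floordiv x (p : Int) ≠ PySem.Int.floordiv x (PySem.Int.floordiv x (p : Int))
            ∧ (p : Int) = PySem.Int.floordiv x (PySem.Int.floordiv x (p : Int))
            ∧ PySem.Int.floordiv x (PySem.Int.floordiv x (p : Int)) < (L : Int)))
        ↔ (PySem.Int.floordiv x (p : Int) ≤ (Nat.sqrt x.toNat : Int)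
            ∧ PySem.Int.floordiv x (p : Int) ≠ (p : Int)) := by
      rw [PySem.List.mem_pyRange_one, hback]
      constructor
      · rintro ⟨⟨_, h⟩, _, hne, _, _⟩; exact ⟨by omega, hne⟩
      · rintro ⟨h, hne⟩
        exact ⟨⟨by omega, by omega⟩,
          (PySem.Int.mod_eq_zero_iff_dvd x _).mpr hqd, hne, rfl, by omega⟩
    rw [if_congr e1 rfl rfl, if_congr e2 rfl rfl,
      if_pos (show 1 ≤ (p : Int) ∧ (p : Int) ∣ x ∧ 1 ≤ x from ⟨hp1, hpd, hx1⟩)]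
    exact pvSqrtPairInt x (p : Int) hx1 hp1 hpd
  · rw [if_neg hH]
    have z1 : ¬((p : Int) ∈ PySem.List.pyRange 1 ((Nat.sqrt x.toNat : Int) + 1) 1
          ∧ (PySem.Int.mod x (p : Int) = 0 ∧ (p : Int) = (p : Int) ∧ (p : Int) < (L : Int))) := by
      rintro ⟨hmem, hq, _, _⟩
      rw [PySem.List.mem_pyRange_one] at hmem
      have hs1 : 1 ≤ (Nat.sqrt x.toNat : Int) := by omega
      have hx1 : 1 ≤ x := by
        have : 1 ≤ Nat.sqrt x.toNat := by exact_mod_cast hs1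
        have h2 := Nat.sqrt_le x.toNat
        have : 1 ≤ x.toNat := by nlinarith
        omega
      exact hH ⟨by omega, (PySem.Int.mod_eq_zero_iff_dvd x _).mp hq, hx1⟩
    have z2 : ¬(PySem.Int.floordiv x (p : Int) ∈ PySem.List.pyRange 1 ((Nat.sqrt x.toNat : Int) + 1) 1
          ∧ (PySem.Int.mod x (PySem.Int.floordiv x (p : Int)) = 0
            ∧ PySem.Int.floordiv x (p : Int) ≠ PySem.Int.floordiv x (PySem.Int.floordiv x (p : Int))
            ∧ (p : Int) = PySem.Int.floordiv x (PySem.Int.floordiv x (p : Int))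
            ∧ PySem.Int.floordiv x (PySem.Int.floordiv x (p : Int)) < (L : Int))) := by
      rintro ⟨hmem, hq, _, hpeq, _⟩
      rw [PySem.List.mem_pyRange_one] at hmem
      have hs1 : 1 ≤ (Nat.sqrt x.toNat : Int) := by omega
      have hx1 : 1 ≤ x := by
        have : 1 ≤ Nat.sqrt x.toNat := by exact_mod_cast hs1
        have h2 := Nat.sqrt_le x.toNat
        have : 1 ≤ x.toNat := by nlinarith
        omega
      set c := PySem.Int.floordiv x (p : Int) with hc
      have hcd : c ∣ x := (PySem.Int.mod_eq_zero_iff_dvd x c).mp hq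
      have hfc : PySem.Int.floordiv x c = x / c := PySem.Int.floordiv_eq_ediv_of_pos (by omega)
      have hxeq : c * (x / c) = x := Int.mul_ediv_cancel' hcd
      have hpdx : (p : Int) ∣ x := by
        rw [hpeq, hfc]
        exact ⟨c, (Int.ediv_mul_cancel hcd).symm⟩
      -- p = x / c ≥ c ≥ 1 since c ≤ √x
      have hcs : c ≤ (Nat.sqrt x.toNat : Int) := by omega
      have hcc : c * c ≤ x := by
        have h1 : (Nat.sqrt x.toNat : Int) * (Nat.sqrt x.toNat : Int) ≤ (x.toNat : Int) := by
          exact_mod_cast Nat.sqrt_le x.toNat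
        have h2 : ((x.toNat : Int)) = x := Int.toNat_of_nonneg hx
        nlinarith
      have hcle : c ≤ x / c := (Int.le_ediv_iff_mul_le (by omega)).mpr (by nlinarith)
      have hp1 : 1 ≤ (p : Int) := by
        rw [hpeq, hfc]
        omega
      exact hH ⟨hp1, hpdx, hx1⟩
    rw [if_neg z1, if_neg z2]
    ring

theorem pvSetFold (S : Int → Int) (b : Int) (p : Nat) :
    ∀ (a : Int) (dv : List Int), 1 ≤ a → b ≤ (dv.length : Int) →
    ((PySem.List.pyRange a b 1).foldl (fun dv d => PySem.List.pySetD dv d (S d)) dv).getD p 0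
      = if a ≤ (p : Int) ∧ (p : Int) < b then S p else dv.getD p 0 := by
  suffices h : ∀ (kk : Nat) (a : Int) (dv : List Int), (b - a).toNat = kk → 1 ≤ a →
      b ≤ (dv.length : Int) →
      ((PySem.List.pyRange a b 1).foldl (fun dv d => PySem.List.pySetD dv d (S d)) dv).getD p 0
        = if a ≤ (p : Int) ∧ (p : Int) < b then S p else dv.getD p 0 by
    intro a dv h1 h2
    exact h _ a dv rfl h1 h2
  intro kk
  induction kk with
  | zero =>
    intro a dv hk h1 h2
    rw [PySem.List.pyRange_one_eq_nil (by omega), List.foldl_nil, if_neg (by omega)]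
  | succ m ih =>
    intro a dv hk h1 h2
    have hab : a < b := by omega
    rw [PySem.List.pyRange_one_cons hab, List.foldl_cons,
      ih (a + 1) _ (by omega) (by omega) (by rw [PySem.List.length_pySetD]; exact h2)]
    have hset : (PySem.List.pySetD dv a (S a)).getD p 0
        = if (p : Int) = a then S a else dv.getD p 0 := by
      rw [PySem.List.pySetD_of_nonneg dv (S a) (by omega), List.getD_eq_getElem?_getD,
        List.getD_eq_getElem?_getD, List.getElem?_set]
      by_cases hpa : a.toNat = p
      · rw [if_pos hpa, if_pos (by omega), if_pos (by omega)]
        simp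
      · rw [if_neg hpa, if_neg (by omega)]
    rw [hset]
    by_cases hpb : a ≤ (p : Int) ∧ (p : Int) < b
    · rw [if_pos hpb]
      by_cases hpa : (p : Int) = a
      · rw [if_neg (by omega), if_pos hpa, hpa]
      · rw [if_pos (by omega)]
    · rw [if_neg hpb, if_neg (by omega), if_neg (by omega)]

theorem pvSumSumComm (ms is : List Int) (g : Int → Int → Int) :
    (ms.map (fun m => (is.map (fun i => g m i)).sum)).sum
      = (is.map (fun i => (ms.map (fun m => g m i)).sum)).sum := by
  induction ms with
  | nil => simp
  | cons m t ih =>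
    simp only [List.map_cons, List.sum_cons]
    rw [ih, ← PySem.List.sum_map_add_int]

theorem pvReplicate_getD (L p : Nat) : (List.replicate L (0 : Int)).getD p 0 = 0 := by
  rw [List.getD_eq_getElem?_getD, List.getElem?_replicate]
  split_ifs <;> simp

theorem pvNodup_pyRange_pos (a b s : Int) (hs : 0 < s) : (PySem.List.pyRange a b s).Nodup := by
  rw [PySem.List.pyRange_of_pos a b hs]
  refine List.Nodup.map ?_ List.nodup_range
  intro k1 k2 h
  have h2 : s * (k1 : Int) = s * (k2 : Int) := by linarith
  have := mul_left_cancel₀ (by omega : s ≠ (0 : Int)) h2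
  exact_mod_cast this

-- facts about the element read in iteration i, under Pre_
theorem pvElem (arr : List Int) (n : Int) (i : Int)
    (h1 : arr ≠ []) (h2 : n ≤ (arr.length : Int)) (h3 : ∀ x ∈ arr.take n.toNat, 0 ≤ x)
    (hi : i ∈ PySem.List.pyRange 0 n 1) :
    0 ≤ PySem.List.pyGetD arr i 0
      ∧ PySem.List.pyGetD arr i 0 ≤ (PySem.List.max? arr (fun y => y)).getD 0 := by
  have hi' := PySem.List.mem_pyRange_one.mp hi
  have hilen : i < (arr.length : Int) := by omega
  have hget : PySem.List.pyGetD arr i 0 = arr[i.toNat] :=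
    PySem.List.pyGetD_eq_getElem arr 0 (by omega) hilen
  have hmem : arr[i.toNat] ∈ arr := List.getElem_mem _
  have hnn : 0 ≤ arr[i.toNat] := by
    apply h3
    have hlt : i.toNat < n.toNat := by omega
    have hlen : i.toNat < (arr.take n.toNat).length := by
      rw [List.length_take]; omega
    have : (arr.take n.toNat)[i.toNat] = arr[i.toNat] := List.getElem_take
    rw [← this]
    exact List.getElem_mem _
  cases hmx : PySem.List.max? arr (fun y => y) with
  | none => exact absurd ((PySem.List.max?_eq_none_iff arr _).mp hmx) h1
  | some mv =>
    have := PySem.List.max?_isMax hmx arr[i.toNat] hmem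
    rw [hget]
    exact ⟨hnn, by simpa using this⟩

theorem pvCharA (arr : List Int) (n k : Int)
    (h1 : arr ≠ []) (h2 : n ≤ (arr.length : Int)) (h3 : ∀ x ∈ arr.take n.toNat, 0 ≤ x) (p : Nat) :
    (findMaxGCD arr n k).getD p 0 = pvCnt arr n p := by
  unfold findMaxGCD pvCnt
  rw [pvFoldl_getD_add _
      (fun i => if 1 ≤ (p : Int) ∧ (p : Int) ∣ PySem.List.pyGetD arr i 0
                  ∧ 1 ≤ PySem.List.pyGetD arr i 0 then (1 : Int) else 0)
      _ p ((((PySem.List.max? arr (fun y => y)).getD 0) + 1).toNat) ?hlen ?hpt _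
      List.length_replicate]
  · rw [pvReplicate_getD]
    ring
  case hlen =>
    intro dv i _
    dsimp only
    rw [pvFoldl_length _ _ ?hl2]
    case hl2 =>
      intro dv' j _
      dsimp only
      split_ifs <;> simp [pvBump_length]
  case hpt =>
    intro dv i hi hdv
    obtain ⟨hx0, hxh⟩ := pvElem arr n i h1 h2 h3 hi
    dsimp only
    rw [pvInnerA (PySem.List.pyGetD arr i 0) hx0 _ (by omega) p dv hdv]
  

theorem pvLenA (arr : List Int) (n k : Int) :
    (findMaxGCD arr n k).length = (((PySem.List.max? arr (fun y => y)).getD 0) + 1).toNat := by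
  unfold findMaxGCD
  rw [pvFoldl_length _ _ ?hl]
  · exact List.length_replicate
  case hl =>
    intro dv i _
    dsimp only
    rw [pvFoldl_length _ _ ?hl2]
    case hl2 =>
      intro dv' j _
      dsimp only
      split_ifs <;> simp [pvBump_length]

theorem pvCharB (arr : List Int) (n k : Int)
    (h1 : arr ≠ []) (h2 : n ≤ (arr.length : Int)) (h3 : ∀ x ∈ arr.take n.toNat, 0 ≤ x) (p : Nat) :
    (findMaxGCD_alt arr n k).getD p 0 = pvCnt arr n p := by
  unfold findMaxGCD_alt pvCnt
  dsimp only
  rw [pvSetFold _ _ p 1 _ (by norm_num) (by rw [List.length_replicate]; omega)]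
  by_cases hp : 1 ≤ (p : Int) ∧ (p : Int) < (PySem.List.max? arr (fun y => y)).getD 0 + 1
  · rw [if_pos hp, PySem.List.foldl_add]
    have hfreq : ∀ m ∈ PySem.List.pyRange (p : Int)
        ((PySem.List.max? arr (fun y => y)).getD 0 + 1) (p : Int),
        PySem.List.pyGetD
          ((PySem.List.pyRange 0 n 1).foldl
            (fun freq i => pvBump freq (PySem.List.pyGetD arr i 0))
            (List.replicate (((PySem.List.max? arr (fun y => y)).getD 0 + 1)).toNat 0)) m 0
          = ((PySem.List.pyRange 0 n 1).map
              (fun i => if m = PySem.List.pyGetD arr i 0 then (1 : Int) else 0)).sum := by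
      intro m hm
      have hm' := (PySem.List.mem_pyRange_iff_of_pos (by omega) m).mp hm
      have hm1 : 1 ≤ m := by omega
      rw [pvGetD_nonneg _ m (by omega)]
      rw [pvFoldl_getD_add _
          (fun i => if m = PySem.List.pyGetD arr i 0 then (1 : Int) else 0)
          _ m.toNat ((((PySem.List.max? arr (fun y => y)).getD 0) + 1).toNat) ?hlen ?hpt _
          List.length_replicate]
      · rw [pvReplicate_getD]; ring
      case hlen =>
        intro dv i _
        dsimp only
        rw [pvBump_length]
      case hpt =>
        intro dv i hi hdv
        obtain ⟨hx0, hxh⟩ := pvElem arr n i h1 h2 h3 hi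
        dsimp only
        rw [pvBump_getD _ _ hx0, hdv]
        congr 1
        apply if_congr _ rfl rfl
        constructor
        · rintro ⟨he, _⟩; omega
        · intro he
          refine ⟨by omega, by omega⟩
    rw [List.map_congr_left hfreq, pvSumSumComm]
    have hinner : ∀ i ∈ PySem.List.pyRange 0 n 1,
        ((PySem.List.pyRange (p : Int)
            ((PySem.List.max? arr (fun y => y)).getD 0 + 1) (p : Int)).map
          (fun m => if m = PySem.List.pyGetD arr i 0 then (1 : Int) else 0)).sum
        = (if 1 ≤ (p : Int) ∧ (p : Int) ∣ PySem.List.pyGetD arr i 0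
              ∧ 1 ≤ PySem.List.pyGetD arr i 0 then (1 : Int) else 0) := by
      intro i hi
      obtain ⟨hx0, hxh⟩ := pvElem arr n i h1 h2 h3 hi
      rw [pvSum_indicator _ (pvNodup_pyRange_pos _ _ _ (by omega))
          (fun m => m = PySem.List.pyGetD arr i 0) (PySem.List.pyGetD arr i 0)
          (fun j _ hP => hP)]
      apply if_congr _ rfl rfl
      rw [PySem.List.mem_pyRange_iff_of_pos (by omega)]
      constructor
      · rintro ⟨⟨hle, _, hdvd⟩, _⟩
        have hd2 : (p : Int) ∣ PySem.List.pyGetD arr i 0 := by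
          have := dvd_add hdvd (dvd_refl (p : Int))
          simpa using this
        exact ⟨hp.1, hd2, by omega⟩
      · rintro ⟨hp1, hdvd, hx1⟩
        have hle : (p : Int) ≤ PySem.List.pyGetD arr i 0 := Int.le_of_dvd (by omega) hdvd
        exact ⟨⟨hle, by omega, dvd_sub hdvd (dvd_refl _)⟩, rfl⟩
    rw [List.map_congr_left hinner]
    ring
  · rw [if_neg hp, pvReplicate_getD]
    symm
    apply List.sum_eq_zero
    intro y hy
    rw [List.mem_map] at hy
    obtain ⟨i, hi, rfl⟩ := hy
    rw [if_neg]
    rintro ⟨hp1, hpd, hx1⟩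
    obtain ⟨hx0, hxh⟩ := pvElem arr n i h1 h2 h3 hi
    have := Int.le_of_dvd (by omega) hpd
    omega

theorem pvLenB (arr : List Int) (n k : Int) :
    (findMaxGCD_alt arr n k).length = (((PySem.List.max? arr (fun y => y)).getD 0) + 1).toNat := by
  unfold findMaxGCD_alt
  rw [pvFoldl_length _ _ ?hl]
  · exact List.length_replicate
  case hl =>
    intro dv d _
    dsimp only
    rw [PySem.List.length_pySetD]

-- ===== VERDICT (by name: the statement is the Claim_ definition above) =====
theorem findMaxGCD_spec : Claim_equal_findMaxGCD := by
  intro arr n k _hdom hpre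
  obtain ⟨h1, h2, h3⟩ := hpre
  unfold Spec_findMaxGCD
  apply List.ext_getElem
  · rw [pvLenA, pvLenB]
  · intro i hi₁ hi₂
    have hA := pvCharA arr n k h1 h2 h3 i
    have hB := pvCharB arr n k h1 h2 h3 i
    rw [List.getD_eq_getElem _ _ hi₁] at hA
    rw [List.getD_eq_getElem _ _ hi₂] at hB
    rw [hA, hB]
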